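-- pv_equiv track=rewrite | github.com/alejandro-parra/Programming-Fundamentals---Python | Final_A01229618.py | ganador
-- ===== SOURCE A (Python) =====
-- def ganador(comp,tiempos):
--     contador=0
--     times=[]
--     for x in tiempos:
--         contador=0
--         for y in x:
--             contador+=y
--         times.append(contador)
--     ganador=times.index(min(times))
--     return "El ganador es %s"%(comp[ganador])
-- ===== SOURCE B (Python) =====
-- def ganador(comp, tiempos):
--     best = None  # (total, index) of the current leader; strict < keeps the first minimum
--     for i, x in enumerate(tiempos):
--         s = 0
--         for y in x:
--             s += y
--         if best is None or s < best[0]: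
--             best = (s, i)
--     return "El ganador es %s" % (comp[best[1]])
-- ===== Notes on version B (the rewrite author's own statement) =====
-- stated objective: alternative
-- what changed: B drops A's intermediate list of totals and its two extra passes (min, then .index) for a single enumerate pass keeping a running (best total, index) pair, replacing the leader only on a strictly smaller total so the first minimum wins.
import Mathlib
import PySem

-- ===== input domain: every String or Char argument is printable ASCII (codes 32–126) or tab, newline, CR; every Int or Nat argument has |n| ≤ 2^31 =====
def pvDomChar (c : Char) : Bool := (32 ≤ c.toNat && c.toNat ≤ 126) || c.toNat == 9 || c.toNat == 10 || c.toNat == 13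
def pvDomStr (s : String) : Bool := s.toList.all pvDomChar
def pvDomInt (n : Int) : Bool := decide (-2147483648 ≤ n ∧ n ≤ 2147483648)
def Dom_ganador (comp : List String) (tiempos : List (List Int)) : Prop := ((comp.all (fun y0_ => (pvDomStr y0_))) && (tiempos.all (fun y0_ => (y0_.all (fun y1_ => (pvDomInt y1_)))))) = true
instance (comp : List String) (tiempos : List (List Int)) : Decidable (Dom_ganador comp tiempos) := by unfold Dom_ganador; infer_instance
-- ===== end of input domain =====

-- B drops A's intermediate list of totals for a single running-best pass (alternative decomposition, same result).

-- ===== PORT A =====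
def ganador (comp : List String) (tiempos : List (List Int)) : String :=
  let times := tiempos.foldl (fun times x => times ++ [x.foldl (fun contador y => contador + y) 0]) []
  match PySem.List.min? times (fun y => y) with
  | none => ""          -- min([]) raises ValueError in Python: excluded by Pre_
  | some m =>
    match PySem.List.index? times m with
    | none => ""        -- unreachable (m ∈ times)
    | some g =>
      match PySem.List.pyGet? comp (g : Int) with
      | none => ""      -- comp[g] raises IndexError in Python: excluded by Pre_
      | some c => "El ganador es " ++ c

-- ===== PORT B =====
def ganador_alt (comp : List String) (tiempos : List (List Int)) : String :=
  let best := (PySem.List.enumerate tiempos 0).foldl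
    (fun best p =>
      let s := p.2.foldl (fun s y => s + y) 0
      match best with
      | none => some (s, p.1)
      | some b => if s < b.1 then some (s, p.1) else some b)
    (none : Option (Int × Int))
  match best with
  | none => ""          -- empty tiempos: Python B raises TypeError (best is None): excluded by Pre_
  | some b =>
    match PySem.List.pyGet? comp b.2 with
    | none => ""        -- IndexError in Python: excluded by Pre_
    | some c => "El ganador es " ++ c

-- ===== PRECONDITION & SPEC =====
def pvSum (r : List Int) : Int := r.foldl (fun c y => c + y) 0

-- Pre_ excludes exactly the inputs on which A raises: empty tiempos (min([]) → ValueError)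
-- and a winning index not shorter than comp (comp[ganador] → IndexError).
def Pre_ganador (comp : List String) (tiempos : List (List Int)) : Prop :=
  tiempos ≠ [] ∧
  ((PySem.List.index? (tiempos.map pvSum)
      (((tiempos.map pvSum).tail).foldl min ((tiempos.map pvSum).headD 0))).getD 0)
    < comp.length

instance (comp : List String) (tiempos : List (List Int)) : Decidable (Pre_ganador comp tiempos) := by
  unfold Pre_ganador; infer_instance

def pvWitness_ganador : List String × List (List Int) := (["ana", "beto"], [[3, 1], [1, 1]])

def Spec_ganador (comp : List String) (tiempos : List (List Int)) (out : String) : Prop := out = ganador_alt comp tiempos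
instance (comp : List String) (tiempos : List (List Int)) (out : String) : Decidable (Spec_ganador comp tiempos out) := by unfold Spec_ganador; infer_instance

-- ===== CLAIM (what is proved, stated in full; the proofs are below) =====
def Claim_equal_ganador : Prop := ∀ (comp : List String) (tiempos : List (List Int)), Dom_ganador comp tiempos → Pre_ganador comp tiempos → Spec_ganador comp tiempos (ganador comp tiempos)

-- ===== LEMMAS AND PROOFS =====

-- reference recursion: first index of the minimal sum, back-to-front
def pvBest : List Int → Int → Option (Int × Int)
  | [], _ => none
  | s :: t, k =>
    match pvBest t (k + 1) with
    | none => some (s, k)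
    | some b => if b.1 < s then some b else some (s, k)

def pvStep (best : Option (Int × Int)) (p : Int × Int) : Option (Int × Int) :=
  match best with
  | none => some (p.2, p.1)
  | some b => if p.2 < b.1 then some (p.2, p.1) else some b

def pvCombine (st r : Option (Int × Int)) : Option (Int × Int) :=
  match r with
  | none => st
  | some b =>
    match st with
    | none => some b
    | some a => if b.1 < a.1 then some b else some a

theorem pv_combine_step (st : Option (Int × Int)) (u k : Int) (r : Option (Int × Int)) :
    pvCombine (pvStep st (k, u)) r =
      pvCombine st (match r with
        | none => some (u, k)
        | some b => if b.1 < u then some b else some (u, k)) := by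
  cases st with
  | none =>
    cases r with
    | none => rfl
    | some b =>
      simp only [pvStep, pvCombine]
      split <;> rfl
  | some a =>
    cases r with
    | none =>
      simp only [pvStep, pvCombine]
    | some b =>
      simp only [pvStep, pvCombine]
      by_cases h1 : u < a.1 <;> by_cases h2 : b.1 < u <;>
        simp only [h1, h2, if_pos, if_neg, ite_true, ite_false] <;>
        split_ifs <;> first | rfl | omega | (exfalso; omega)

theorem pv_foldl_enum_eq (t : List Int) (k : Int) (st : Option (Int × Int)) :
    (PySem.List.enumerate t k).foldl pvStep st = pvCombine st (pvBest t k) := by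
  induction t generalizing k st with
  | nil => rfl
  | cons u t' ih =>
    rw [PySem.List.enumerate_cons]
    simp only [List.foldl_cons]
    rw [ih, pv_combine_step]
    rfl

theorem pv_foldl_min_comm (t : List Int) (a b : Int) :
    t.foldl min (min a b) = min a (t.foldl min b) := by
  induction t generalizing b with
  | nil => rfl
  | cons x xs ih =>
    simp only [List.foldl_cons]
    rw [min_assoc, ih]

theorem pv_best_spec (t : List Int) (s : Int) (k : Int) :
    ∃ J : Nat, PySem.List.index? (s :: t) (t.foldl min s) = some J ∧
      pvBest (s :: t) k = some (t.foldl min s, k + (J : Int)) := by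
  induction t generalizing s k with
  | nil =>
    refine ⟨0, ?_, ?_⟩
    · simp
    · simp [pvBest]
  | cons u t' ih =>
    obtain ⟨J', hJ', hB'⟩ := ih u (k + 1)
    have hmin : (u :: t').foldl min s = min s (t'.foldl min u) := by
      simp only [List.foldl_cons]
      exact pv_foldl_min_comm t' s u
    by_cases hlt : t'.foldl min u < s
    · refine ⟨J' + 1, ?_, ?_⟩
      · have hne : s ≠ (u :: t').foldl min s := by
          rw [hmin]; omega
        rw [PySem.List.index?_cons_of_ne _ hne, hmin, min_eq_right (le_of_lt hlt), hJ']
        rfl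
      · show (match pvBest (u :: t') (k + 1) with
          | none => some (s, k)
          | some b => if b.1 < s then some b else some (s, k)) = _
        rw [hB']
        simp only [hmin, min_eq_right (le_of_lt hlt), if_pos hlt]
        congr 1
        push_cast
        ring_nf
    · refine ⟨0, ?_, ?_⟩
      · rw [hmin, min_eq_left (by omega), PySem.List.index?_cons_self]
      · show (match pvBest (u :: t') (k + 1) with
          | none => some (s, k)
          | some b => if b.1 < s then some b else some (s, k)) = _
        rw [hB']
        simp only [hmin, min_eq_left (by omega : s ≤ t'.foldl min u), if_neg hlt]
        simp

theorem pv_enumerate_map (l : List (List Int)) (k : Int) :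
    PySem.List.enumerate (l.map pvSum) k
      = (PySem.List.enumerate l k).map (fun p => (p.1, pvSum p.2)) := by
  induction l generalizing k with
  | nil => rfl
  | cons x xs ih =>
    simp only [List.map_cons, PySem.List.enumerate_cons, List.map_cons]
    rw [ih]

-- ===== VERDICT (by name: the statement is the Claim_ definition above) =====
theorem ganador_spec : Claim_equal_ganador := by
  intro comp tiempos _ hpre
  obtain ⟨hne, hidx⟩ := hpre
  cases tiempos with
  | nil => exact absurd rfl hne
  | cons r rs =>
    unfold Spec_ganador ganador ganador_alt
    -- A's times list is the list of row sums
    have htimes : (r :: rs).foldl (fun ts x => ts ++ [x.foldl (fun c y => c + y) 0]) []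
        = (r :: rs).map pvSum := by
      have h0 := PySem.List.foldl_append_singleton_eq_map pvSum (r :: rs) []
      rw [List.nil_append] at h0
      exact h0
    simp only [htimes]
    -- B's fold over rows = pvStep fold over the sums
    have hfold : (PySem.List.enumerate (r :: rs) 0).foldl
        (fun best (p : Int × List Int) =>
          let s := p.2.foldl (fun s y => s + y) 0
          match best with
          | none => some (s, p.1)
          | some b => if s < b.1 then some (s, p.1) else some b)
        (none : Option (Int × Int))
        = (PySem.List.enumerate ((r :: rs).map pvSum) 0).foldl pvStep none := by
      rw [pv_enumerate_map, List.foldl_map]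
      rfl
    simp only [hfold, pv_foldl_enum_eq]
    -- characterize min?, index? and pvBest on the sums list
    obtain ⟨J, hJ, hB⟩ := pv_best_spec (rs.map pvSum) (pvSum r) 0
    have hmin : PySem.List.min? ((r :: rs).map pvSum) (fun y => y)
        = some ((rs.map pvSum).foldl min (pvSum r)) := by
      simp only [List.map_cons]
      exact PySem.List.min?_id_cons _ _
    have hJlt : J < comp.length := by
      have h := hidx
      simp only [List.map_cons, List.headD_cons, List.tail_cons] at h
      rw [hJ] at h
      simpa using h
    have hget : PySem.List.pyGet? comp (J : Int) = some comp[J] := by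
      rw [PySem.List.pyGet?_natCast]
      exact List.getElem?_eq_getElem hJlt
    simp only [List.map_cons] at hmin hJ hB ⊢
    simp only [hmin, hJ, hB, pvCombine, zero_add, hget]
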